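-- pv_equiv track=rewrite | github.com/rob-mosher/musicxml-to-motif | src/musicxml_to_motif/detector.py | _generate_motif_description
-- ===== SOURCE A (Python) =====
-- def _generate_motif_description(intervals: list[int], rhythm: list[str]) -> str:
--     """Generate a human-readable description of a motif.
--
--     Args:
--         intervals: List of pitch intervals
--         rhythm: List of rhythm values
--
--     Returns:
--         A descriptive string
--     """
--     # Describe rhythm pattern
--     rhythm_desc = "-".join(rhythm)
--
--     # Describe melodic contour
--     if not intervals:
--         contour_desc = "single note"
--     elif all(i == 0 for i in intervals):
--         contour_desc = "repeated note"
--     elif all(i > 0 for i in intervals):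
--         contour_desc = "ascending"
--     elif all(i < 0 for i in intervals):
--         contour_desc = "descending"
--     else:
--         # Mixed contour
--         ups = sum(1 for i in intervals if i > 0)
--         downs = sum(1 for i in intervals if i < 0)
--         if ups > downs:
--             contour_desc = "mostly ascending"
--         elif downs > ups:
--             contour_desc = "mostly descending"
--         else:
--             contour_desc = "wave-like"
--
--     # Describe interval characteristics
--     if intervals:
--         max_interval = max(abs(i) for i in intervals)
--         if max_interval <= 2:
--             interval_desc = "stepwise"
--         elif max_interval <= 4:
--             interval_desc = "small leaps"
--         else:
--             interval_desc = "wide leaps"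
--     else:
--         interval_desc = ""
--
--     # Combine descriptions
--     parts = [rhythm_desc, contour_desc]
--     if interval_desc:
--         parts.append(interval_desc)
--
--     return f"{' '.join(parts)} pattern"
-- ===== SOURCE B (Python) =====
-- def _generate_motif_description(intervals: list[int], rhythm: list[str]) -> str:
--     """Sort once, then read everything off order statistics: the endpoints of the
--     sorted list decide the pure contours and the widest leap, and the lengths of
--     the negative prefix / positive suffix decide the mixed contour."""
--     s = sorted(intervals)
--     head = "-".join(rhythm) + " "
--     if not s:
--         return head + "single note pattern"
--     lo, hi = s[0], s[-1]
--     if lo == 0 and hi == 0: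
--         contour = "repeated note"
--     elif lo > 0:
--         contour = "ascending"
--     elif hi < 0:
--         contour = "descending"
--     else:
--         downs = _neg_prefix_len(s)                 # negatives form a prefix of s
--         ups = _neg_prefix_len([-x for x in reversed(s)])   # positives form a suffix of s
--         if ups > downs:
--             contour = "mostly ascending"
--         elif downs > ups:
--             contour = "mostly descending"
--         else:
--             contour = "wave-like"
--     widest = hi if hi > -lo else -lo
--     size = "stepwise" if widest <= 2 else "small leaps" if widest <= 4 else "wide leaps"
--     return head + contour + " " + size + " pattern"
--
--
-- def _neg_prefix_len(s: list[int]) -> int: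
--     k = 0
--     for x in s:
--         if x >= 0:
--             break
--         k += 1
--     return k
-- ===== Notes on version B (the rewrite author's own statement) =====
-- stated objective: alternative
-- what changed: A classifies by repeated predicate scans (three all(), two sum() generators, one max()) over the unsorted list; B sorts the intervals once and reads everything off order statistics: the endpoints of the sorted list decide the pure contours and the widest leap, and the lengths of the negative prefix / positive suffix (found by early-exit scans over the sorted list) decide the mixed contour.
import Mathlib
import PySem

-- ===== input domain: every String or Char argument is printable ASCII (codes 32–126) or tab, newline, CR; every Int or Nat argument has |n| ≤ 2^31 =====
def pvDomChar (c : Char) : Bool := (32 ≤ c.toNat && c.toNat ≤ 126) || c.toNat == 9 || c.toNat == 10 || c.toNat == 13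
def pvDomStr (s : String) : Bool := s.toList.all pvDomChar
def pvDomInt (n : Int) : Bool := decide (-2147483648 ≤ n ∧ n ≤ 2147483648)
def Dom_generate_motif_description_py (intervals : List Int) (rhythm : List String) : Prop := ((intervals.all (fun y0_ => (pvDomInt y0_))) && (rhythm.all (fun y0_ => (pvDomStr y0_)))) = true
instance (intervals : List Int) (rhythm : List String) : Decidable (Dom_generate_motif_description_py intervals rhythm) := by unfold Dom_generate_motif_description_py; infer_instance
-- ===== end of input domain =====

-- B sorts the intervals once and reads the answer off order statistics (the endpoints of the
-- sorted list decide the pure contours and the widest leap; the negative-prefix/positive-suffix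
-- lengths decide the mixed contour), instead of A's repeated predicate scans; objective: alternative.

-- ===== PORT A =====
def generate_motif_description_py (intervals : List Int) (rhythm : List String) : String :=
  let rhythm_desc := PySem.Str.join "-" rhythm
  let contour_desc :=
    if intervals.isEmpty then "single note"
    else if intervals.all (fun i => i == 0) then "repeated note"
    else if intervals.all (fun i => decide (0 < i)) then "ascending"
    else if intervals.all (fun i => decide (i < 0)) then "descending"
    else
      let ups := intervals.foldl (fun s i => if 0 < i then s + 1 else s) (0 : Int)
      let downs := intervals.foldl (fun s i => if i < 0 then s + 1 else s) (0 : Int)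
      if downs < ups then "mostly ascending"
      else if ups < downs then "mostly descending"
      else "wave-like"
  let interval_desc :=
    if !intervals.isEmpty then
      -- Python's max(...) raises on an empty sequence; it is guarded here, so the
      -- `none` branch below is unreachable.
      match PySem.List.max? (intervals.map (fun i => |i|)) (fun x => x) with
      | some max_interval =>
        if max_interval ≤ 2 then "stepwise"
        else if max_interval ≤ 4 then "small leaps"
        else "wide leaps"
      | none => ""
    else ""
  let parts := [rhythm_desc, contour_desc]
  let parts := if interval_desc ≠ "" then parts ++ [interval_desc] else parts
  PySem.Str.join " " parts ++ " pattern"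

-- ===== PORT B =====
-- helper _neg_prefix_len of Source B: length of the strictly-negative prefix (loop with early break)
def pvNegPrefixLen : List Int → Int
  | [] => 0
  | x :: t => if 0 ≤ x then 0 else 1 + pvNegPrefixLen t

def generate_motif_description_py_alt (intervals : List Int) (rhythm : List String) : String :=
  let s := PySem.List.sorted intervals (fun x => x) false
  let head := PySem.Str.join "-" rhythm ++ " "
  match s with
  | [] => head ++ "single note pattern"
  | x :: t =>
    let lo := x
    let hi := t.getLastD x          -- s[-1]
    let contour :=
      if lo == 0 && hi == 0 then "repeated note"
      else if 0 < lo then "ascending"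
      else if hi < 0 then "descending"
      else
        let downs := pvNegPrefixLen (x :: t)
        let ups := pvNegPrefixLen ((x :: t).reverse.map (fun y => -y))
        if downs < ups then "mostly ascending"
        else if ups < downs then "mostly descending"
        else "wave-like"
    let widest := if -lo < hi then hi else -lo
    let size :=
      if widest ≤ 2 then "stepwise"
      else if widest ≤ 4 then "small leaps"
      else "wide leaps"
    head ++ contour ++ " " ++ size ++ " pattern"

-- ===== PRECONDITION & SPEC =====
def Spec_generate_motif_description_py (intervals : List Int) (rhythm : List String) (out : String) : Prop := out = generate_motif_description_py_alt intervals rhythm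
instance (intervals : List Int) (rhythm : List String) (out : String) : Decidable (Spec_generate_motif_description_py intervals rhythm out) := by unfold Spec_generate_motif_description_py; infer_instance

-- ===== CLAIM (what is proved, stated in full; the proofs are below) =====
def Claim_equal_generate_motif_description_py : Prop := ∀ (intervals : List Int) (rhythm : List String), Dom_generate_motif_description_py intervals rhythm → Spec_generate_motif_description_py intervals rhythm (generate_motif_description_py intervals rhythm)

-- ===== LEMMAS AND PROOFS =====

lemma pvJoin2 (a b : String) : PySem.Str.join " " [a, b] = a ++ " " ++ b := by
  apply String.toList_injective
  simp [PySem.Str.join, PySem.Chars.join, List.intercalate]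

lemma pvJoin3 (a b c : String) : PySem.Str.join " " [a, b, c] = a ++ " " ++ b ++ " " ++ c := by
  apply String.toList_injective
  simp [PySem.Str.join, PySem.Chars.join, List.intercalate]

-- the last element of a ≤-sorted nonempty list is its maximum
lemma pvLe_getLastD (x : Int) (t : List Int) (h : (x :: t).Pairwise (· ≤ ·)) :
    ∀ y ∈ x :: t, y ≤ t.getLastD x := by
  induction t generalizing x with
  | nil => intro y hy; simp at hy; simp [hy]
  | cons z u ih =>
    intro y hy
    have h1 : x ≤ z := (List.pairwise_cons.mp h).1 z (by simp)
    have h2 := ih z (List.pairwise_cons.mp h).2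
    rw [List.getLastD_cons]
    rcases List.mem_cons.mp hy with rfl | hy'
    · exact le_trans h1 (h2 z (by simp))
    · exact h2 y hy' 

-- on a ≤-sorted list the strictly-negative elements form a prefix, so the prefix scan counts them
lemma pvNegPrefixLen_eq (s : List Int) (h : s.Pairwise (· ≤ ·)) :
    pvNegPrefixLen s = ((s.countP (fun y => decide (y < 0)) : Nat) : Int) := by
  induction s with
  | nil => simp [pvNegPrefixLen]
  | cons x t ih =>
    obtain ⟨hx, ht⟩ := List.pairwise_cons.mp h
    by_cases h0 : 0 ≤ x
    · have ht0 : t.countP (fun y => decide (y < 0)) = 0 := by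
        rw [List.countP_eq_zero]
        intro y hy
        have := hx y hy
        simp only [decide_eq_true_eq]
        omega
      have hx0 : ¬ (x < 0) := by omega
      simp [pvNegPrefixLen, h0, ht0, hx0]
    · have hx0 : x < 0 := by omega
      rw [List.countP_cons]
      simp only [pvNegPrefixLen, h0, if_false, ih ht, hx0, decide_true]
      push_cast
      ring

-- ===== VERDICT (by name: the statement is the Claim_ definition above) =====
theorem generate_motif_description_py_spec : Claim_equal_generate_motif_description_py := by
  intro intervals rhythm _
  unfold Spec_generate_motif_description_py
  unfold generate_motif_description_py generate_motif_description_py_alt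
  cases hs : PySem.List.sorted intervals (fun x => x) false with
  | nil =>
    have hnil : intervals = [] := (PySem.List.sorted_eq_nil_iff intervals _ false).mp hs
    subst hnil
    simp only [List.isEmpty_nil, if_true, Bool.not_true, Bool.false_eq_true, if_false,
      ne_eq, not_true_eq_false]
    rw [pvJoin2]
    apply String.toList_injective
    simp
  | cons x t =>
    have hperm : (x :: t).Perm intervals := by rw [← hs]; exact PySem.List.sorted_perm intervals _ false
    have hpw : (x :: t).Pairwise (· ≤ ·) := by
      have := PySem.List.sorted_pairwise intervals (fun x => x)
      rw [hs] at this; exact this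
    have hne : intervals ≠ [] := by
      intro h; subst h
      have := hperm.length_eq; simp at this
    have hmem : ∀ y ∈ intervals, y ∈ x :: t := fun y hy => hperm.mem_iff.mpr hy
    have hmin : ∀ y ∈ intervals, x ≤ y := by
      intro y hy
      rcases List.mem_cons.mp (hmem y hy) with h | h
      · omega
      · exact (List.pairwise_cons.mp hpw).1 y h
    have hmax : ∀ y ∈ intervals, y ≤ t.getLastD x := fun y hy => pvLe_getLastD x t hpw y (hmem y hy)
    have hxmem : x ∈ intervals := hperm.subset (by simp)
    have hLmem : t.getLastD x ∈ intervals := hperm.subset List.getLastD_mem_cons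
    have hE : intervals.isEmpty = false := by
      cases intervals with
      | nil => exact absurd rfl hne
      | cons a b => rfl
    -- branch conditions of A in terms of the endpoints of the sorted list
    have c1 : intervals.all (fun i => i == 0) = (x == 0 && t.getLastD x == 0) := by
      rw [Bool.eq_iff_iff]
      simp only [List.all_eq_true, Bool.and_eq_true, beq_iff_eq]
      constructor
      · intro h; exact ⟨h x hxmem, h (t.getLastD x) hLmem⟩
      · rintro ⟨h1, h2⟩ y hy
        have := hmin y hy; have := hmax y hy; omega
    have c2 : intervals.all (fun i => decide (0 < i)) = decide (0 < x) := by
      rw [Bool.eq_iff_iff]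
      simp only [List.all_eq_true, decide_eq_true_eq]
      exact ⟨fun h => h x hxmem, fun h y hy => by have := hmin y hy; omega⟩
    have c3 : intervals.all (fun i => decide (i < 0)) = decide (t.getLastD x < 0) := by
      rw [Bool.eq_iff_iff]
      simp only [List.all_eq_true, decide_eq_true_eq]
      exact ⟨fun h => h (t.getLastD x) hLmem, fun h y hy => by have := hmax y hy; omega⟩
    -- the two count loops of A equal B's prefix lengths on the sorted list
    have hrevpw : ((x :: t).reverse.map (fun y => -y)).Pairwise (· ≤ ·) := by
      rw [List.pairwise_map, List.pairwise_reverse]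
      exact hpw.imp (by intro a b h; omega)
    have cups : intervals.foldl (fun s i => if 0 < i then s + 1 else s) (0 : Int)
        = pvNegPrefixLen ((x :: t).reverse.map (fun y => -y)) := by
      rw [PySem.List.foldl_ite_add_one, pvNegPrefixLen_eq _ hrevpw, List.countP_map,
        List.countP_reverse]
      have : List.countP ((fun y => decide (y < 0)) ∘ fun y => -y) (x :: t)
          = List.countP (fun i => decide (0 < i)) intervals := by
        exact hperm.countP_congr (by intro y _; simp only [Function.comp]; exact decide_eq_decide.mpr (by omega))
      rw [this]
      simp
    have cdowns : intervals.foldl (fun s i => if i < 0 then s + 1 else s) (0 : Int)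
        = pvNegPrefixLen (x :: t) := by
      rw [PySem.List.foldl_ite_add_one, pvNegPrefixLen_eq _ hpw]
      have : List.countP (fun y => decide (y < 0)) (x :: t)
          = List.countP (fun i => decide (i < 0)) intervals := by
        exact hperm.countP_congr (by intro y _; rfl)
      rw [this]
      simp
    -- the maximum absolute interval is max(-lo, hi)
    obtain ⟨M, hM⟩ : ∃ M, PySem.List.max? (intervals.map (fun i => |i|)) (fun x => x) = some M := by
      cases hm : PySem.List.max? (intervals.map (fun i => |i|)) (fun x => x) with
      | some M => exact ⟨M, rfl⟩
      | none =>
        rw [PySem.List.max?_eq_none_iff, List.map_eq_nil_iff] at hm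
        exact absurd hm hne
    have hMval : M = if -x < t.getLastD x then t.getLastD x else -x := by
      obtain ⟨y, hy, hyM⟩ := List.mem_map.mp (PySem.List.max?_mem hM)
      have hιsMax := PySem.List.max?_isMax hM
      have h3 : -x ≤ M := le_trans (neg_le_abs x) (hιsMax _ (List.mem_map_of_mem hxmem))
      have h4 : t.getLastD x ≤ M :=
        le_trans (le_abs_self _) (hιsMax _ (List.mem_map_of_mem hLmem))
      have h1 := hmin y hy
      have h2 := hmax y hy
      rcases abs_cases y with ⟨e, _⟩ | ⟨e, _⟩ <;> rw [e] at hyM <;> split_ifs <;> omega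
    simp only [hE, Bool.false_eq_true, if_false, Bool.not_false, if_true,
      c1, c2, c3, cups, cdowns, hM, hMval]
    -- the interval description is never the empty string here
    have hI : (if (if -x < t.getLastD x then t.getLastD x else -x) ≤ 2 then "stepwise"
        else if (if -x < t.getLastD x then t.getLastD x else -x) ≤ 4 then "small leaps"
        else "wide leaps") ≠ "" := by
      split_ifs <;> decide
    rw [if_pos hI]
    simp only [List.cons_append, List.nil_append, decide_eq_true_eq]
    rw [pvJoin3]
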